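-- pv_equiv track=rewrite | github.com/Sinduja811/MyJournie | src/ai/chatbot_engine.py | pick_therapy_strategy
-- ===== SOURCE A (Python) =====
-- def pick_therapy_strategy(sentiment_label: str, risk: int, user_message: str) -> str:
--     msg = user_message.lower()
--
--     if any(k in msg for k in ["stupid", "worthless", "failure"]):
--         return "cbt_restructure"
--
--     if any(k in msg for k in ["must", "should", "never", "always"]):
--         return "rebt_dispute"
--
--     if any(k in msg for k in ["anxious", "worried", "panic"]):
--         return "act_acceptance"
--
--     if "stuck" in msg or "don't know" in msg:
--         return "sfbt_scaling"
--
--     if sentiment_label == "NEGATIVE":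
--         return "dbt_grounding"
--
--     return "reflective_support"
-- ===== SOURCE B (Python) =====
-- # Flat priority map: every keyword carries its rule's priority; take the MIN priority
-- # among all keywords found in the message (order of testing is irrelevant), then map it
-- # to a strategy. No ordered cascade, no early return.
-- PRIORITY = {
--     "stupid": 0, "worthless": 0, "failure": 0,
--     "must": 1, "should": 1, "never": 1, "always": 1,
--     "anxious": 2, "worried": 2, "panic": 2,
--     "stuck": 3, "don't know": 3,
-- }
-- STRATEGIES = ["cbt_restructure", "rebt_dispute", "act_acceptance", "sfbt_scaling"]
--
-- def pick_therapy_strategy(sentiment_label: str, risk: int, user_message: str) -> str: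
--     msg = user_message.lower()
--     hits = [p for k, p in PRIORITY.items() if k in msg]
--     if hits:
--         return STRATEGIES[min(hits)]
--     return "dbt_grounding" if sentiment_label == "NEGATIVE" else "reflective_support"
-- ===== Notes on version B (the rewrite author's own statement) =====
-- stated objective: alternative
-- what changed: Replaces the ordered if-cascade of keyword groups by a flat keyword->priority map: B collects the priorities of ALL matched keywords, takes the minimum, and indexes a strategy table with it (min-aggregation instead of first-match early return); the sentiment/default tail is the no-hit branch.
import Mathlib
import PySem

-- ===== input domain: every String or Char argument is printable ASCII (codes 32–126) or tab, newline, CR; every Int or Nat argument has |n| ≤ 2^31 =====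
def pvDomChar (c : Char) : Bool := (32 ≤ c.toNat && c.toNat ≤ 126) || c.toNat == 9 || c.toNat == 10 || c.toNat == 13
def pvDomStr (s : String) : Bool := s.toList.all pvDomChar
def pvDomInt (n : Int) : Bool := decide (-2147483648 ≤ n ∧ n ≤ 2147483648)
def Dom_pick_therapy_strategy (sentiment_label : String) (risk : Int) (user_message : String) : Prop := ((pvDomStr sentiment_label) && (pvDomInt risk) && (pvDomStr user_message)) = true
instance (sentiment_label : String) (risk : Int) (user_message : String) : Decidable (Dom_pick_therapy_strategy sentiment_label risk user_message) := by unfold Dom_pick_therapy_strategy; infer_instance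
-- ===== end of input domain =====

-- B replaces A's ordered if-cascade by a flat keyword→priority map with min-aggregation (alternative decomposition; same cost).

-- ===== PORT A =====
def pick_therapy_strategy (sentiment_label : String) (risk : Int) (user_message : String) : String :=
  let msg := PySem.Str.lower user_message
  if ["stupid", "worthless", "failure"].any (fun k => PySem.Str.isIn k msg) then "cbt_restructure"
  else if ["must", "should", "never", "always"].any (fun k => PySem.Str.isIn k msg) then "rebt_dispute"
  else if ["anxious", "worried", "panic"].any (fun k => PySem.Str.isIn k msg) then "act_acceptance"
  else if PySem.Str.isIn "stuck" msg || PySem.Str.isIn "don't know" msg then "sfbt_scaling"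
  else if sentiment_label == "NEGATIVE" then "dbt_grounding"
  else "reflective_support"

-- ===== PORT B =====
-- PRIORITY dict (distinct literal keys, insertion order) as an association list
def pvPRIORITY : List (String × Int) :=
  [ ("stupid", 0), ("worthless", 0), ("failure", 0),
    ("must", 1), ("should", 1), ("never", 1), ("always", 1),
    ("anxious", 2), ("worried", 2), ("panic", 2),
    ("stuck", 3), ("don't know", 3) ]

def pvSTRATEGIES : List String :=
  ["cbt_restructure", "rebt_dispute", "act_acceptance", "sfbt_scaling"]

def pick_therapy_strategy_alt (sentiment_label : String) (risk : Int) (user_message : String) : String :=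
  let msg := PySem.Str.lower user_message
  let hits := pvPRIORITY.filterMap (fun kp => if PySem.Str.isIn kp.1 msg then some kp.2 else none)
  match PySem.List.min? hits (fun p => p) with   -- min? = none exactly when hits = [], i.e. Python's `if hits:` guard fails
  | some m => (PySem.List.pyGet? pvSTRATEGIES m).getD ""   -- m ∈ {0,1,2,3}, so the index is always in range
  | none => if sentiment_label == "NEGATIVE" then "dbt_grounding" else "reflective_support"

-- ===== PRECONDITION & SPEC =====
def Spec_pick_therapy_strategy (sentiment_label : String) (risk : Int) (user_message : String) (out : String) : Prop := out = pick_therapy_strategy_alt sentiment_label risk user_message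
instance (sentiment_label : String) (risk : Int) (user_message : String) (out : String) : Decidable (Spec_pick_therapy_strategy sentiment_label risk user_message out) := by unfold Spec_pick_therapy_strategy; infer_instance

-- ===== CLAIM (what is proved, stated in full; the proofs are below) =====
def Claim_equal_pick_therapy_strategy : Prop := ∀ (sentiment_label : String) (risk : Int) (user_message : String), Dom_pick_therapy_strategy sentiment_label risk user_message → Spec_pick_therapy_strategy sentiment_label risk user_message (pick_therapy_strategy sentiment_label risk user_message)

-- ===== LEMMAS AND PROOFS =====

-- Both programs as a function of the twelve keyword-membership booleans and the sentiment test: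
-- generalizing those closes the goal by case analysis.
set_option maxHeartbeats 2000000 in
theorem pv_bool_core (b1 b2 b3 b4 b5 b6 b7 b8 b9 b10 b11 b12 s : Bool) :
    (if [b1, b2, b3].any id then "cbt_restructure"
     else if [b4, b5, b6, b7].any id then "rebt_dispute"
     else if [b8, b9, b10].any id then "act_acceptance"
     else if b11 || b12 then "sfbt_scaling"
     else if s then "dbt_grounding"
     else "reflective_support") =
    (match PySem.List.min?
        (([ (b1, (0:Int)), (b2, 0), (b3, 0), (b4, 1), (b5, 1), (b6, 1), (b7, 1),
            (b8, 2), (b9, 2), (b10, 2), (b11, 3), (b12, 3) ] : List (Bool × Int)).filterMap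
          (fun kp => if kp.1 then some kp.2 else none)) (fun p => p) with
     | some m => (PySem.List.pyGet? pvSTRATEGIES m).getD ""
     | none => if s then "dbt_grounding" else "reflective_support") := by
  revert b1 b2 b3 b4 b5 b6 b7 b8 b9 b10 b11 b12 s
  decide

-- ===== VERDICT (by name: the statement is the Claim_ definition above) =====
theorem pick_therapy_strategy_spec : Claim_equal_pick_therapy_strategy := by
  intro sl risk um _
  unfold Spec_pick_therapy_strategy pick_therapy_strategy pick_therapy_strategy_alt pvPRIORITY
  have h := pv_bool_core
    (PySem.Str.isIn "stupid" (PySem.Str.lower um)) (PySem.Str.isIn "worthless" (PySem.Str.lower um))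
    (PySem.Str.isIn "failure" (PySem.Str.lower um)) (PySem.Str.isIn "must" (PySem.Str.lower um))
    (PySem.Str.isIn "should" (PySem.Str.lower um)) (PySem.Str.isIn "never" (PySem.Str.lower um))
    (PySem.Str.isIn "always" (PySem.Str.lower um)) (PySem.Str.isIn "anxious" (PySem.Str.lower um))
    (PySem.Str.isIn "worried" (PySem.Str.lower um)) (PySem.Str.isIn "panic" (PySem.Str.lower um))
    (PySem.Str.isIn "stuck" (PySem.Str.lower um)) (PySem.Str.isIn "don't know" (PySem.Str.lower um))
    (sl == "NEGATIVE")
  simpa [List.any, List.filterMap] using h
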